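-- pv_equiv track=rewrite | github.com/patrickelectric/webots | scripts/web_component_studio/controllers/web_component_studio_supervisor/web_component_studio_supervisor.py | _compareDevice
-- ===== SOURCE A (Python) =====
-- def _cmp(a, b):
--     return (a > b) - (a < b)
--
-- def _compareDevice(d1, d2):
--     priortyDeviceTypes = ['RotationalMotor', 'LinearMotor', 'LED']  # Device types appearing first.
--     for priortyDeviceType in priortyDeviceTypes:
--         if d1['type'] == priortyDeviceType and d2['type'] == priortyDeviceType:
--             return _cmp(d1['name'].lower(), d2['name'].lower())
--         elif d1['type'] == priortyDeviceType:
--             return -1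
--         elif d2['type'] == priortyDeviceType:
--             return 1
--     return _cmp(d1['name'].lower(), d2['name'].lower())
-- ===== SOURCE B (Python) =====
-- def _key(d):
--     try:
--         r = ['RotationalMotor', 'LinearMotor', 'LED'].index(d['type'])
--     except ValueError:
--         r = 3
--     return chr(r) + d.get('name', '').lower()
--
-- def _cmp(a, b):
--     return (a > b) - (a < b)
--
-- def _compareDevice(d1, d2):
--     return _cmp(_key(d1), _key(d2))
-- ===== Notes on version B (the rewrite author's own statement) =====
-- stated objective: alternative
-- what changed: Replaces A's loop over priority types with its branch ladder by building a single sort-key string per device (a rank character prefixed to the lowercase name) and returning one lexicographic string comparison of the two keys, with no branching in the comparator.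
import Mathlib
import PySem

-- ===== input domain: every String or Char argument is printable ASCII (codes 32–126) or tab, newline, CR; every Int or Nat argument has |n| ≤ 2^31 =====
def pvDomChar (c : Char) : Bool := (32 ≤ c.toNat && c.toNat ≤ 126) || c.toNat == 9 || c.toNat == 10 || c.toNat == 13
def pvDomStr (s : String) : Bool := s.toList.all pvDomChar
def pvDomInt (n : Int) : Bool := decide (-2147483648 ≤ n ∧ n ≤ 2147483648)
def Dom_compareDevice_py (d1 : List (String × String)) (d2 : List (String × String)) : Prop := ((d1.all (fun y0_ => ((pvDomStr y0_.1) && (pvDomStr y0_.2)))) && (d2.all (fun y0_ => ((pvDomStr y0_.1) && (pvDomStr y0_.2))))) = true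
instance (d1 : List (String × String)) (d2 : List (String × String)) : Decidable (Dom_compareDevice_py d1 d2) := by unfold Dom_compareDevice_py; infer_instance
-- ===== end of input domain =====

-- B builds one sort-key string per device (rank char + lowercase name) and returns a single
-- lexicographic string comparison, replacing A's priority-type loop and branch ladder.


-- shared module helper _cmp(a, b) = (a > b) - (a < b), on strings (List Char)
def pvCmpChars (a b : List Char) : Int :=
  (if PySem.Chars.strLt b a then 1 else 0) - (if PySem.Chars.strLt a b then 1 else 0)

-- d['name'].lower() / d.get('name','').lower() (under Pre_ the key is present where A reads it)
def pvLowerName (d : List (String × String)) : List Char :=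
  PySem.Chars.lower ((d.lookup "name").getD "").toList

-- ===== PORT A =====
-- the for-loop over priortyDeviceTypes, as structural recursion
def pvLoopA (t1 t2 : String) (d1 d2 : List (String × String)) : List String → Int
  | [] => pvCmpChars (pvLowerName d1) (pvLowerName d2)
  | p :: ps =>
      if t1 == p && t2 == p then pvCmpChars (pvLowerName d1) (pvLowerName d2)
      else if t1 == p then -1
      else if t2 == p then 1
      else pvLoopA t1 t2 d1 d2 ps

def compareDevice_py (d1 : List (String × String)) (d2 : List (String × String)) : Int :=
  pvLoopA ((d1.lookup "type").getD "") ((d2.lookup "type").getD "") d1 d2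
    ["RotationalMotor", "LinearMotor", "LED"]

-- ===== PORT B =====
-- _key(d): chr(rank) + d.get('name','').lower(); list.index with try/except → index? getD 3
def pvKey (d : List (String × String)) : List Char :=
  Char.ofNat ((PySem.List.index? ["RotationalMotor", "LinearMotor", "LED"]
      ((d.lookup "type").getD "")).getD 3)
    :: pvLowerName d

def compareDevice_py_alt (d1 : List (String × String)) (d2 : List (String × String)) : Int :=
  pvCmpChars (pvKey d1) (pvKey d2)

-- ===== PRECONDITION & SPEC =====
-- rank of a type string (used only to state Pre_, not by either port)
def pvRankOf (t : String) : Nat :=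
  if t == "RotationalMotor" then 0 else if t == "LinearMotor" then 1
  else if t == "LED" then 2 else 3

-- Pre_ excludes exactly the inputs where Python A raises KeyError: a missing 'type' key,
-- or a missing 'name' key when the two types have equal priority rank (names are read then).
def Pre_compareDevice_py (d1 : List (String × String)) (d2 : List (String × String)) : Prop :=
  (d1.lookup "type").isSome = true ∧ (d2.lookup "type").isSome = true ∧
  (pvRankOf ((d1.lookup "type").getD "") = pvRankOf ((d2.lookup "type").getD "") →
    (d1.lookup "name").isSome = true ∧ (d2.lookup "name").isSome = true)
instance (d1 : List (String × String)) (d2 : List (String × String)) : Decidable (Pre_compareDevice_py d1 d2) := by unfold Pre_compareDevice_py; infer_instance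

def pvWitness_compareDevice_py : (List (String × String)) × (List (String × String)) :=
  ([("type", "LED"), ("name", "a")], [("type", "Camera"), ("name", "b")])

def Spec_compareDevice_py (d1 : List (String × String)) (d2 : List (String × String)) (out : Int) : Prop := out = compareDevice_py_alt d1 d2
instance (d1 : List (String × String)) (d2 : List (String × String)) (out : Int) : Decidable (Spec_compareDevice_py d1 d2 out) := by unfold Spec_compareDevice_py; infer_instance

-- ===== CLAIM (what is proved, stated in full; the proofs are below) =====
def Claim_equal_compareDevice_py : Prop := ∀ (d1 : List (String × String)) (d2 : List (String × String)), Dom_compareDevice_py d1 d2 → Pre_compareDevice_py d1 d2 → Spec_compareDevice_py d1 d2 (compareDevice_py d1 d2)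

-- ===== LEMMAS AND PROOFS =====
-- A's loop characterised: rank comparison first, names on equal ranks
def pvCmpNat (a b : Nat) : Int := (if b < a then 1 else 0) - (if a < b then 1 else 0)

theorem pvLoop_eq (t1 t2 : String) (d1 d2 : List (String × String)) :
    pvLoopA t1 t2 d1 d2 ["RotationalMotor", "LinearMotor", "LED"] =
    (if pvRankOf t1 ≠ pvRankOf t2 then pvCmpNat (pvRankOf t1) (pvRankOf t2)
     else pvCmpChars (pvLowerName d1) (pvLowerName d2)) := by
  by_cases h1 : t1 = "RotationalMotor" <;> by_cases h2 : t1 = "LinearMotor" <;>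
    by_cases h3 : t1 = "LED" <;>
  by_cases g1 : t2 = "RotationalMotor" <;> by_cases g2 : t2 = "LinearMotor" <;>
    by_cases g3 : t2 = "LED" <;>
  simp_all [pvLoopA, pvRankOf, pvCmpNat]

-- B's rank prefix is pvRankOf
theorem pvIndex_eq_rank (t : String) :
    (PySem.List.index? ["RotationalMotor", "LinearMotor", "LED"] t).getD 3 = pvRankOf t := by
  by_cases h1 : t = "RotationalMotor"
  · subst h1; decide
  by_cases h2 : t = "LinearMotor"
  · subst h2; decide
  by_cases h3 : t = "LED"
  · subst h3; decide
  simp [PySem.List.index?_eq_idxOf?, List.idxOf?, List.findIdx?, List.findIdx?.go, pvRankOf,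
    h1, h2, h3,
    (show ("RotationalMotor" == t) = false by simp [Ne.symm h1]),
    (show ("LinearMotor" == t) = false by simp [Ne.symm h2]),
    (show ("LED" == t) = false by simp [Ne.symm h3])]

-- comparing keys: heads decide unless equal
theorem pvCmpChars_cons (a b : Char) (s t : List Char) :
    pvCmpChars (a :: s) (b :: t) =
    (if a ≠ b then pvCmpNat a.toNat b.toNat else pvCmpChars s t) := by
  by_cases h : a = b
  · subst h
    simp [pvCmpChars, PySem.Chars.strLt]
  · have hne' : b ≠ a := Ne.symm h
    rcases Nat.lt_or_ge a.toNat b.toNat with hlt | hge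
    · have hab : a < b := Char.lt_def.mpr hlt
      have hnb : ¬ b < a := by
        intro hba; exact absurd (lt_trans hba hab) (lt_irrefl b)
      simp [pvCmpChars, PySem.Chars.strLt, List.cons_lt_cons_iff, pvCmpNat, h, hne', hab, hnb, hlt,
        Nat.not_lt.mpr (Nat.le_of_lt hlt)]
    · have hba : b.toNat < a.toNat := Nat.lt_of_le_of_ne hge (by
        intro e; exact h (Char.ext (UInt32.toNat_inj.mp e.symm)))
      have hbalt : b < a := Char.lt_def.mpr hba
      have hnab : ¬ a < b := by
        intro hx; exact absurd (lt_trans hx hbalt) (lt_irrefl a)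
      simp [pvCmpChars, PySem.Chars.strLt, List.cons_lt_cons_iff, pvCmpNat, h, hne', hbalt, hnab,
        hba, Nat.not_lt.mpr (Nat.le_of_lt hba)]

theorem pvRankOf_le (t : String) : pvRankOf t ≤ 3 := by
  unfold pvRankOf; split_ifs <;> omega

theorem pvOfNat_toNat_rank (t : String) : (Char.ofNat (pvRankOf t)).toNat = pvRankOf t := by
  have := pvRankOf_le t
  interval_cases h : pvRankOf t <;> decide

-- ===== VERDICT (by name: the statement is the Claim_ definition above) =====
theorem compareDevice_py_spec : Claim_equal_compareDevice_py := by
  intro d1 d2 _ _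
  unfold Spec_compareDevice_py compareDevice_py compareDevice_py_alt pvKey
  rw [pvLoop_eq, pvIndex_eq_rank, pvIndex_eq_rank, pvCmpChars_cons,
    pvOfNat_toNat_rank, pvOfNat_toNat_rank]
  have := pvRankOf_le ((d1.lookup "type").getD "")
  have := pvRankOf_le ((d2.lookup "type").getD "")
  by_cases h : pvRankOf ((d1.lookup "type").getD "") = pvRankOf ((d2.lookup "type").getD "")
  · simp [h]
  · have : Char.ofNat (pvRankOf ((d1.lookup "type").getD "")) ≠
        Char.ofNat (pvRankOf ((d2.lookup "type").getD "")) := by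
      intro e
      have e2 := congrArg Char.toNat e
      rw [pvOfNat_toNat_rank, pvOfNat_toNat_rank] at e2
      exact h e2
    simp [h, this]
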